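-- pv_equiv track=rewrite | github.com/Kristen-Steudel/opencap-core | clean_preaugment_markers.py | build_marker_groups
-- ===== SOURCE A (Python) =====
-- TOE_GROUPS = (('LBigToe', 'LSmallToe'), ('RBigToe', 'RSmallToe'))
--
-- def build_marker_groups(marker_names):
--     """
--     Build list of (display_label, [marker_names]) for overview.
--     LBigToe+LSmallToe and RBigToe+RSmallToe are grouped.
--     """
--     seen = set()
--     groups = []
--     for m in sorted(marker_names):
--         if m in seen:
--             continue
--         for pair in TOE_GROUPS:
--             if m in pair:
--                 group = [x for x in pair if x in marker_names]
--                 if group: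
--                     group.sort()
--                     for g in group:
--                         seen.add(g)
--                     groups.append((f"{group[0]}/{group[1]}" if len(group) == 2 else group[0], group))
--                 break
--         else:
--             seen.add(m)
--             groups.append((m, [m]))
--     return groups
-- ===== SOURCE B (Python) =====
-- TOE_GROUPS = (('LBigToe', 'LSmallToe'), ('RBigToe', 'RSmallToe'))
--
-- def build_marker_groups(marker_names):
--     """
--     Build list of (display_label, [marker_names]) for overview.
--     LBigToe+LSmallToe and RBigToe+RSmallToe are grouped.
--     """
--     entries = []
--     for pair in TOE_GROUPS:
--         members = sorted(x for x in pair if x in marker_names)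
--         if members:
--             label = "/".join(members) if len(members) == 2 else members[0]
--             entries.append((label, members))
--     toe = {x for pair in TOE_GROUPS for x in pair}
--     for name in dict.fromkeys(marker_names):
--         if name not in toe:
--             entries.append((name, [name]))
--     entries.sort(key=lambda e: e[1][0])
--     return entries
-- ===== Notes on version B (the rewrite author's own statement) =====
-- stated objective: alternative
-- what changed: Instead of one stateful pass over sorted(marker_names) with a 'seen' set that skips already-grouped toe markers, B builds all group entries independently (one entry per present toe pair, one singleton per distinct non-toe name) and then sorts the entries by their minimum member, which reproduces A's first-encounter-in-sorted-order placement.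
import Mathlib
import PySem

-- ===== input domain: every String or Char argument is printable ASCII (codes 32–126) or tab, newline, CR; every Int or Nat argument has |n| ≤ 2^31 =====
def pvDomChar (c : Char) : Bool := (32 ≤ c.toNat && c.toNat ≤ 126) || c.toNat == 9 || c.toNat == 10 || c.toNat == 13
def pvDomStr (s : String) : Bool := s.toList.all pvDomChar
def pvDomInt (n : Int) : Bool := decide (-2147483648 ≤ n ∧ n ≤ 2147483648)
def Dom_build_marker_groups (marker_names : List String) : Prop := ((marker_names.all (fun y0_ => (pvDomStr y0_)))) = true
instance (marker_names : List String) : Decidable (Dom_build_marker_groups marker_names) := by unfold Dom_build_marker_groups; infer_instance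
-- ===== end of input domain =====

-- B replaces A's stateful sweep over sorted(marker_names) (with a 'seen' set) by building the
-- group entries independently (per toe pair / per distinct non-toe name) and sorting them by
-- their minimum member; objective: alternative decomposition, same cost.

-- ===== PORT A =====
def TOE_GROUPS : List (List String) := [["LBigToe", "LSmallToe"], ["RBigToe", "RSmallToe"]]

-- f"{group[0]}/{group[1]}" if len(group) == 2 else group[0]; indices are total forms
-- (headD/getD): group is nonempty, resp. of length 2, wherever Python evaluates them.
def pvLabelA (group : List String) : String :=
  if group.length = 2 then group.headD "" ++ "/" ++ group.getD 1 "" else group.headD ""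

-- the body of A's 'for m in sorted(marker_names)' loop; the for/break/else over TOE_GROUPS is
-- the first pair containing m, i.e. List.find?.
def pvStepA (marker_names : List String) (st : PySem.Set String × List (String × List String))
    (m : String) : PySem.Set String × List (String × List String) :=
  if PySem.Set.contains st.1 m then st
  else
    match TOE_GROUPS.find? (fun pair => pair.contains m) with
    | some pair =>
        let group := pair.filter (fun x => marker_names.contains x)
        if group.isEmpty then st
        else
          let group := PySem.List.sorted group (fun x => x) false
          (group.foldl PySem.Set.add st.1, st.2 ++ [(pvLabelA group, group)])
    | none => (PySem.Set.add st.1 m, st.2 ++ [(m, [m])])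

def build_marker_groups (marker_names : List String) : List (String × List String) :=
  ((PySem.List.sorted marker_names (fun x => x) false).foldl (pvStepA marker_names)
    (PySem.Set.empty, [])).2

-- ===== PORT B =====
-- key=lambda e: e[1][0]; total form headD: every entry's member list is nonempty.
def pvKey (e : String × List String) : String := e.2.headD ""

def pvToeSet : PySem.Set String := PySem.Set.ofList (TOE_GROUPS.flatMap id)

def pvPairEntries (marker_names : List String) : List (String × List String) :=
  TOE_GROUPS.foldl (fun acc pair =>
    let members := PySem.List.sorted (pair.filter (fun x => marker_names.contains x)) (fun x => x) false
    if members.isEmpty then acc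
    else acc ++ [((if members.length = 2 then PySem.Str.join "/" members else members.headD ""), members)]) []

def pvSingles (marker_names : List String) : List (String × List String) :=
  (PySem.List.dedup marker_names).foldl (fun acc name =>
    if !(PySem.Set.contains pvToeSet name) then acc ++ [(name, [name])] else acc) []

def build_marker_groups_alt (marker_names : List String) : List (String × List String) :=
  PySem.List.sorted (pvPairEntries marker_names ++ pvSingles marker_names) pvKey false

-- ===== PRECONDITION & SPEC =====
def Spec_build_marker_groups (marker_names : List String) (out : List (String × List String)) : Prop := out = build_marker_groups_alt marker_names
instance (marker_names : List String) (out : List (String × List String)) : Decidable (Spec_build_marker_groups marker_names out) := by unfold Spec_build_marker_groups; infer_instance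

-- ===== CLAIM (what is proved, stated in full; the proofs are below) =====
def Claim_equal_build_marker_groups : Prop := ∀ (marker_names : List String), Dom_build_marker_groups marker_names → Spec_build_marker_groups marker_names (build_marker_groups marker_names)

-- ===== LEMMAS AND PROOFS =====

-- 'triggered': x's group entry has already been emitted after processing prefix P of the sorted list
def pvTrig (mk P : List String) (x : String) : Prop :=
  (TOE_GROUPS.find? (fun pair => pair.contains x)).elim (x ∈ P)
    (fun pair => ∃ y, y ∈ pair ∧ y ∈ mk ∧ y ∈ P)

theorem pvTrig_nil (mk : List String) (x : String) : ¬ pvTrig mk [] x := by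
  unfold pvTrig; cases TOE_GROUPS.find? (fun pair => pair.contains x) <;> simp

-- A's loop as a structural recursion producing only the emitted entries
def pvProcA (mk : List String) : List String → PySem.Set String → List (String × List String)
  | [], _ => []
  | m :: rest, seen =>
    if PySem.Set.contains seen m then pvProcA mk rest seen
    else
      match TOE_GROUPS.find? (fun pair => pair.contains m) with
      | some pair =>
          let group := pair.filter (fun x => mk.contains x)
          if group.isEmpty then pvProcA mk rest seen
          else
            let g := PySem.List.sorted group (fun x => x) false
            (pvLabelA g, g) :: pvProcA mk rest (g.foldl PySem.Set.add seen)
      | none => (m, [m]) :: pvProcA mk rest (PySem.Set.add seen m)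

theorem pvFoldEq (mk : List String) (L : List String)
    (st : PySem.Set String × List (String × List String)) :
    (L.foldl (pvStepA mk) st).2 = st.2 ++ pvProcA mk L st.1 := by
  induction L generalizing st with
  | nil => simp [pvProcA]
  | cons m rest ih =>
    rw [List.foldl_cons, ih]
    show (pvStepA mk st m).2 ++ _ = _
    unfold pvStepA
    by_cases h : m ∈ st.1
    · simp [pvProcA, PySem.Set.contains, h]
    · cases hf : TOE_GROUPS.find? (fun pair => decide (m ∈ pair)) with
      | none => simp [pvProcA, PySem.Set.contains, h, hf]
      | some pair =>
        by_cases hg : ∀ a ∈ pair, a ∉ mk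
        · simp [pvProcA, PySem.Set.contains, h, hf, if_pos hg]
        · simp [pvProcA, PySem.Set.contains, h, hf, if_neg hg]

-- proof-side abbreviations for B's entries
def pvGroup (mk pair : List String) : List String :=
  PySem.List.sorted (pair.filter (fun x => mk.contains x)) (fun x => x) false

def pvEntryB (mk pair : List String) : String × List String :=
  (if (pvGroup mk pair).length = 2 then PySem.Str.join "/" (pvGroup mk pair)
   else (pvGroup mk pair).headD "", pvGroup mk pair)

def pvE (mk : List String) : List (String × List String) :=
  pvPairEntries mk ++ pvSingles mk

theorem pvContains_iff {s : PySem.Set String} {x : String} :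
    PySem.Set.contains s x = true ↔ x ∈ s := by
  simp [PySem.Set.contains]

theorem pvJoin_pair (u v : String) : PySem.Str.join "/" [u, v] = u ++ "/" ++ v := by
  apply String.ext
  simp [PySem.Str.join, PySem.Chars.join, List.intercalate, List.intersperse]

theorem pvLabelA_eq (g : List String) (hg : g.length ≤ 2) :
    pvLabelA g = (if g.length = 2 then PySem.Str.join "/" g else g.headD "") := by
  match g with
  | [] => simp [pvLabelA]
  | [x] => simp [pvLabelA]
  | [x, y] => simp [pvLabelA, pvJoin_pair]
  | x :: y :: z :: t => simp at hg

theorem pvToeSet_eq : pvToeSet = ["LBigToe", "LSmallToe", "RBigToe", "RSmallToe"] := by decide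

theorem pvSingles_eq (mk : List String) :
    pvSingles mk = ((PySem.List.dedup mk).filter
      (fun n => !(PySem.Set.contains pvToeSet n))).map (fun n => (n, [n])) := by
  unfold pvSingles
  exact PySem.List.foldl_append_if _ _ _ []

theorem pvPairEntries_eq (mk : List String) :
    pvPairEntries mk =
      (if (pvGroup mk ["LBigToe", "LSmallToe"]).isEmpty then []
        else [pvEntryB mk ["LBigToe", "LSmallToe"]]) ++
      (if (pvGroup mk ["RBigToe", "RSmallToe"]).isEmpty then []
        else [pvEntryB mk ["RBigToe", "RSmallToe"]]) := by
  simp only [pvPairEntries, TOE_GROUPS, List.foldl, pvGroup, pvEntryB]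
  split_ifs <;> simp_all

theorem pvAlt_eq (mk : List String) :
    build_marker_groups_alt mk = PySem.List.sorted (pvE mk) pvKey false := rfl

theorem pvMem_group {mk p : List String} {x : String} :
    x ∈ pvGroup mk p ↔ x ∈ p ∧ x ∈ mk := by
  simp [pvGroup, PySem.List.mem_sorted]

theorem pvE_mem {mk : List String} {e : String × List String} :
    e ∈ pvE mk ↔
      (∃ p, p ∈ TOE_GROUPS ∧ pvGroup mk p ≠ [] ∧ e = pvEntryB mk p) ∨
      (∃ n, n ∈ mk ∧ n ∉ pvToeSet ∧ e = (n, [n])) := by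
  rw [pvE, pvPairEntries_eq, pvSingles_eq]
  simp only [List.mem_append, List.mem_map, List.mem_filter, PySem.List.mem_dedup,
    TOE_GROUPS, List.mem_cons, List.not_mem_nil, or_false, List.isEmpty_iff,
    Bool.not_eq_true']
  constructor
  · rintro ((h | h) | ⟨n, ⟨hn1, hn2⟩, rfl⟩)
    · split_ifs at h with h1
      · simp at h
      · simp at h
        exact Or.inl ⟨_, Or.inl rfl, h1, h⟩
    · split_ifs at h with h1
      · simp at h
      · simp at h
        exact Or.inl ⟨_, Or.inr rfl, h1, h⟩
    · exact Or.inr ⟨n, hn1, by simpa using hn2, rfl⟩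
  · rintro (⟨p, hp, hne, rfl⟩ | ⟨n, hn1, hn2, rfl⟩)
    · rcases hp with rfl | rfl
      · exact Or.inl (Or.inl (by simp [hne]))
      · exact Or.inl (Or.inr (by simp [hne]))
    · exact Or.inr ⟨n, ⟨hn1, by simpa using hn2⟩, rfl⟩

theorem pvKey_entry {mk p : List String} (h : pvGroup mk p ≠ []) :
    pvKey (pvEntryB mk p) ∈ p ∧ pvKey (pvEntryB mk p) ∈ mk ∧
      ∀ y ∈ p, y ∈ mk → pvKey (pvEntryB mk p) ≤ y := by
  rcases hg : pvGroup mk p with _ | ⟨hd, t⟩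
  · exact absurd hg h
  have hkey : pvKey (pvEntryB mk p) = hd := by simp [pvEntryB, pvKey, hg]
  have hmem : hd ∈ pvGroup mk p := by rw [hg]; exact List.mem_cons_self
  have h1 := pvMem_group.mp hmem
  have hg' : PySem.List.sorted (p.filter (fun x => mk.contains x)) (fun x => x) = hd :: t := hg
  have hle := PySem.List.key_head_sorted_le (p.filter (fun x => mk.contains x)) (fun x => x) hg'
  refine ⟨hkey ▸ h1.1, hkey ▸ h1.2, ?_⟩
  intro y hy hymk
  have : y ∈ p.filter (fun x => mk.contains x) := List.mem_filter.mpr ⟨hy, by simpa using hymk⟩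
  rw [hkey]
  exact hle y this

theorem pvPair_unique {p q : List String} {x : String} (hp : p ∈ TOE_GROUPS)
    (hq : q ∈ TOE_GROUPS) (hxp : x ∈ p) (hxq : x ∈ q) : p = q := by
  simp only [TOE_GROUPS, List.mem_cons] at hp hq
  rcases hp with rfl | hp <;> rcases hq with rfl | hq <;> simp_all <;>
    rcases hxp with rfl | rfl <;> simp_all

theorem pvMem_toe_of_pair {p : List String} {x : String} (hp : p ∈ TOE_GROUPS)
    (hx : x ∈ p) : x ∈ pvToeSet := by
  rw [pvToeSet_eq]
  simp only [TOE_GROUPS, List.mem_cons] at hp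
  rcases hp with rfl | hp <;> simp_all <;> rcases hx with rfl | rfl <;> simp

theorem pvFind_of_mem {p : List String} {x : String} (hp : p ∈ TOE_GROUPS) (hxp : x ∈ p) :
    TOE_GROUPS.find? (fun q => q.contains x) = some p := by
  simp only [TOE_GROUPS, List.mem_cons] at hp
  rcases hp with rfl | hp <;> simp_all [TOE_GROUPS, List.find?] <;>
    rcases hxp with rfl | rfl <;> simp_all

theorem pvFind_none_iff {x : String} :
    TOE_GROUPS.find? (fun q => q.contains x) = none ↔ x ∉ pvToeSet := by
  rw [pvToeSet_eq]
  simp [TOE_GROUPS, List.find?_eq_none]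
  tauto

theorem pvE_key_mem {mk : List String} {e : String × List String} (he : e ∈ pvE mk) :
    pvKey e ∈ mk := by
  rcases pvE_mem.mp he with ⟨p, _, hne, rfl⟩ | ⟨n, hn, _, rfl⟩
  · exact (pvKey_entry hne).2.1
  · simpa [pvKey] using hn

theorem pvE_key_nodup (mk : List String) : ((pvE mk).map pvKey).Nodup := by
  have hs : (pvSingles mk).map pvKey
      = (PySem.List.dedup mk).filter (fun n => !(PySem.Set.contains pvToeSet n)) := by
    rw [pvSingles_eq, List.map_map]
    simp [pvKey, Function.comp_def]
  have hnds : ((pvSingles mk).map pvKey).Nodup := by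
    rw [hs]; exact (PySem.List.nodup_dedup mk).filter _
  have hsnontoe : ∀ k ∈ (pvSingles mk).map pvKey, k ∉ pvToeSet := by
    rw [hs]
    intro k hk
    have := (List.mem_filter.mp hk).2
    simpa [pvContains_iff] using this
  have hpairtoe : ∀ k ∈ (pvPairEntries mk).map pvKey, k ∈ pvToeSet := by
    rw [pvPairEntries_eq]
    intro k hk
    rw [List.map_append] at hk
    rcases List.mem_append.mp hk with h | h
    · by_cases h1 : (pvGroup mk ["LBigToe", "LSmallToe"]).isEmpty = true
      · rw [if_pos h1] at h; simp at h
      · rw [if_neg h1] at h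
        simp only [List.map_cons, List.map_nil, List.mem_cons, List.not_mem_nil, or_false] at h
        subst h
        exact pvMem_toe_of_pair (by simp [TOE_GROUPS])
          (pvKey_entry (by simpa [List.isEmpty_iff] using h1)).1
    · by_cases h2 : (pvGroup mk ["RBigToe", "RSmallToe"]).isEmpty = true
      · rw [if_pos h2] at h; simp at h
      · rw [if_neg h2] at h
        simp only [List.map_cons, List.map_nil, List.mem_cons, List.not_mem_nil, or_false] at h
        subst h
        exact pvMem_toe_of_pair (by simp [TOE_GROUPS])
          (pvKey_entry (by simpa [List.isEmpty_iff] using h2)).1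
  rw [pvE, List.map_append]
  refine List.Nodup.append ?_ hnds ?_
  · rw [pvPairEntries_eq, List.map_append]
    refine List.Nodup.append ?_ ?_ ?_
    · split_ifs <;> simp
    · split_ifs <;> simp
    · intro k hk1 hk2
      by_cases h1 : (pvGroup mk ["LBigToe", "LSmallToe"]).isEmpty = true
      · rw [if_pos h1] at hk1; simp at hk1
      · rw [if_neg h1] at hk1
        by_cases h2 : (pvGroup mk ["RBigToe", "RSmallToe"]).isEmpty = true
        · rw [if_pos h2] at hk2; simp at hk2
        · rw [if_neg h2] at hk2
          simp only [List.map_cons, List.map_nil, List.mem_cons, List.not_mem_nil,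
            or_false] at hk1 hk2
          have hA := (pvKey_entry (mk := mk) (p := ["LBigToe", "LSmallToe"])
            (by simpa [List.isEmpty_iff] using h1)).1
          have hB := (pvKey_entry (mk := mk) (p := ["RBigToe", "RSmallToe"])
            (by simpa [List.isEmpty_iff] using h2)).1
          rw [← hk1] at hA
          rw [← hk2] at hB
          simp only [List.mem_cons, List.not_mem_nil, or_false] at hA hB
          rcases hA with rfl | rfl <;> rcases hB with h | h <;> exact absurd h (by decide)
  · intro k hk1 hk2
    exact absurd (hpairtoe k hk1) (hsnontoe k hk2)

theorem pvSE_pairwise (mk : List String) :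
    (PySem.List.sorted (pvE mk) pvKey false).Pairwise (fun x y => pvKey x < pvKey y) := by
  have h1 := PySem.List.sorted_pairwise (pvE mk) pvKey
  have hperm : (PySem.List.sorted (pvE mk) pvKey false).Perm (pvE mk) :=
    PySem.List.sorted_perm (pvE mk) pvKey false
  have hnd : ((PySem.List.sorted (pvE mk) pvKey false).map pvKey).Nodup :=
    ((hperm.map pvKey).nodup_iff).mpr (pvE_key_nodup mk)
  have h2 : (PySem.List.sorted (pvE mk) pvKey false).Pairwise (fun a b => pvKey a ≠ pvKey b) :=
    List.pairwise_map.mp hnd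
  exact (h1.and h2).imp fun h => lt_of_le_of_ne h.1 h.2

theorem pvPrefixLe {P L : List String} (hpw : (P ++ L).Pairwise (· ≤ ·)) {k b : String}
    (hk : k ∈ P ++ L) (hb : b ∈ P) (hle : k ≤ b) : k ∈ P := by
  rcases List.mem_append.mp hk with h | h
  · exact h
  · have := (List.pairwise_append.mp hpw).2.2 b hb k h
    have : k = b := le_antisymm hle this
    exact this ▸ hb

theorem pvPrefixLt {P L' : List String} {m : String} (hpw : (P ++ m :: L').Pairwise (· ≤ ·))
    {k : String} (hk : k ∈ P ++ m :: L') (hlt : k < m) : k ∈ P := by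
  rcases List.mem_append.mp hk with h | h
  · exact h
  · exfalso
    have hpw2 := (List.pairwise_append.mp hpw).2.1
    rcases List.mem_cons.mp h with rfl | h2
    · exact absurd hlt (lt_irrefl _)
    · have := (List.pairwise_cons.mp hpw2).1 k h2
      exact absurd (lt_of_lt_of_le hlt this) (lt_irrefl _)

theorem pvFilterStable {es : List (String × List String)} {P : List String} {m : String}
    (hall : ∀ e ∈ es, pvKey e = m → m ∈ P) :
    es.filter (fun e => !(P.contains (pvKey e))) =
      es.filter (fun e => !((P ++ [m]).contains (pvKey e))) := by
  apply List.filter_congr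
  intro e he
  by_cases hk : pvKey e = m
  · have := hall e he hk
    simp [hk, this]
  · simp [hk]

theorem pvFilterHead {es : List (String × List String)} {e : String × List String}
    {P : List String} {m : String} (hkey : pvKey e = m)
    (hp : es.Pairwise (fun x y => pvKey x < pvKey y)) (he : e ∈ es) (hm : m ∉ P)
    (hsmall : ∀ e' ∈ es, pvKey e' < m → pvKey e' ∈ P) :
    es.filter (fun x => !(P.contains (pvKey x))) =
      e :: es.filter (fun x => !((P ++ [m]).contains (pvKey x))) := by
  induction es with
  | nil => cases he
  | cons a es ih =>
    rcases List.mem_cons.mp he with rfl | he2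
    · have hc1 : (!P.contains (pvKey e)) = true := by
        simpa [hkey] using hm
      have hc2 : (!(P ++ [m]).contains (pvKey e)) = false := by
        simp
        intro _
        exact hkey
      rw [List.filter_cons, if_pos hc1, List.filter_cons,
        if_neg (by simp; intro _; exact hkey)]
      congr 1
      apply List.filter_congr
      intro b hb
      have hlt : pvKey e < pvKey b := (List.pairwise_cons.mp hp).1 b hb
      have hne : pvKey b ≠ m := by rw [← hkey]; exact (ne_of_gt hlt)
      simp [hne]
    · have hka : pvKey a < m := by
        have := (List.pairwise_cons.mp hp).1 e he2
        rw [hkey] at this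
        exact this
      have haP : pvKey a ∈ P := hsmall a List.mem_cons_self hka
      have hc1 : (!P.contains (pvKey a)) = false := by
        simpa using haP
      have hc2 : (!(P ++ [m]).contains (pvKey a)) = false := by
        simp [haP]
      rw [List.filter_cons, if_neg (by simp [haP]), List.filter_cons, if_neg (by simp [haP])]
      exact ih (List.pairwise_cons.mp hp).2 he2
        (fun e' he' hlt => hsmall e' (List.mem_cons_of_mem a he') hlt)

theorem pvTrig_mono {mk P Q : List String} {x : String} (h : pvTrig mk P x) :
    pvTrig mk (P ++ Q) x := by
  unfold pvTrig at h ⊢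
  cases heq : TOE_GROUPS.find? (fun pair => pair.contains x) with
  | none =>
    rw [heq] at h
    simp only [Option.elim_none] at h ⊢
    exact List.mem_append_left _ h
  | some pair =>
    rw [heq] at h
    simp only [Option.elim_some] at h ⊢
    obtain ⟨y, hy1, hy2, hy3⟩ := h
    exact ⟨y, hy1, hy2, List.mem_append_left _ hy3⟩

theorem pvTrig_snoc {mk P : List String} {m x : String} (hm : pvTrig mk P m) (hmmk : m ∈ mk) :
    pvTrig mk (P ++ [m]) x ↔ pvTrig mk P x := by
  constructor
  · intro h
    unfold pvTrig at h ⊢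
    cases heq : TOE_GROUPS.find? (fun pair => pair.contains x) with
    | some pair =>
      rw [heq] at h
      simp only [Option.elim] at h ⊢
      obtain ⟨y, hy1, hy2, hy3⟩ := h
      rcases List.mem_append.mp hy3 with hP | hM
      · exact ⟨y, hy1, hy2, hP⟩
      · have hym : y = m := by simpa using hM
        subst hym
        have hpairmem : pair ∈ TOE_GROUPS := List.mem_of_find?_eq_some heq
        unfold pvTrig at hm
        rw [pvFind_of_mem hpairmem hy1] at hm
        exact hm
    | none =>
      rw [heq] at h
      simp only [Option.elim] at h ⊢
      rcases List.mem_append.mp h with hP | hM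
      · exact hP
      · have : x = m := by simpa using hM
        subst this
        unfold pvTrig at hm
        rw [heq] at hm
        exact hm
  · exact fun h => pvTrig_mono h

theorem pvFoldAdd (g : List String) (Z : PySem.Set String) (x : String) :
    PySem.Set.contains (g.foldl PySem.Set.add Z) x = true ↔
      x ∈ g ∨ PySem.Set.contains Z x = true := by
  induction g generalizing Z with
  | nil => simp
  | cons a g ih =>
    rw [List.foldl_cons, ih]
    simp only [pvContains_iff, PySem.Set.mem_add, List.mem_cons]
    tauto

theorem pvMain (mk : List String) (L P : List String) (Z : PySem.Set String)
    (hS : PySem.List.sorted mk (fun x => x) false = P ++ L)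
    (hZ : ∀ x, PySem.Set.contains Z x = true ↔ (x ∈ mk ∧ pvTrig mk P x)) :
    pvProcA mk L Z
      = (build_marker_groups_alt mk).filter (fun e => !(P.contains (pvKey e))) := by
  induction L generalizing P Z with
  | nil =>
    rw [pvProcA]
    symm
    rw [List.filter_eq_nil_iff]
    intro e he
    rw [pvAlt_eq] at he
    have hkey : pvKey e ∈ mk := pvE_key_mem ((PySem.List.mem_sorted _ _ _ _).mp he)
    have hP : pvKey e ∈ P := by
      have h1 : pvKey e ∈ PySem.List.sorted mk (fun x => x) false :=
        (PySem.List.mem_sorted _ _ _ _).mpr hkey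
      rw [hS] at h1
      simpa using h1
    simp [hP]
  | cons m L' ih =>
    have hpwS : (P ++ m :: L').Pairwise (· ≤ ·) := by
      have := PySem.List.sorted_pairwise mk (fun x => x)
      rw [hS] at this
      exact this
    have hmmk : m ∈ mk := by
      have h1 : m ∈ PySem.List.sorted mk (fun x => x) false := by rw [hS]; simp
      exact (PySem.List.mem_sorted _ _ _ _).mp h1
    have hsmallP : ∀ k, k ∈ mk → k < m → k ∈ P := by
      intro k hk hlt
      apply pvPrefixLt hpwS ?_ hlt
      rw [← hS]
      exact (PySem.List.mem_sorted _ _ _ _).mpr hk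
    have hS' : PySem.List.sorted mk (fun x => x) false = (P ++ [m]) ++ L' := by rw [hS]; simp
    have hsmallE : ∀ e' ∈ build_marker_groups_alt mk, pvKey e' < m → pvKey e' ∈ P := by
      intro e' he' hlt
      rw [pvAlt_eq] at he'
      exact hsmallP _ (pvE_key_mem ((PySem.List.mem_sorted _ _ _ _).mp he')) hlt
    rw [pvProcA]
    by_cases hseen : PySem.Set.contains Z m = true
    · rw [if_pos hseen]
      obtain ⟨_, htrig⟩ := (hZ m).mp hseen
      have hstable : ∀ e ∈ build_marker_groups_alt mk, pvKey e = m → m ∈ P := by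
        intro e he hke
        rw [pvAlt_eq] at he
        rcases pvE_mem.mp ((PySem.List.mem_sorted _ _ _ _).mp he) with ⟨p, hp, hne, rfl⟩ | ⟨n, _, hn2, rfl⟩
        · -- pair entry with key m : m is its pair's minimum present member
          have hk := pvKey_entry hne
          rw [hke] at hk
          unfold pvTrig at htrig
          rw [pvFind_of_mem hp hk.1] at htrig
          simp only [Option.elim] at htrig
          obtain ⟨y, hy1, hy2, hy3⟩ := htrig
          exact pvPrefixLe hpwS (by rw [← hS]; exact (PySem.List.mem_sorted _ _ _ _).mpr hk.2.1)
            hy3 (hk.2.2 y hy1 hy2)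
        · -- singleton entry (m,[m]) : m is not a toe marker, trig is plain membership
          have hkm : n = m := by simpa [pvKey] using hke
          subst hkm
          unfold pvTrig at htrig
          rw [pvFind_none_iff.mpr hn2] at htrig
          exact htrig
      rw [ih (P ++ [m]) Z hS' ?_]
      · exact (pvFilterStable hstable).symm
      · intro x
        rw [hZ x, pvTrig_snoc htrig hmmk]
    · rw [if_neg hseen]
      have hntrig : ¬ pvTrig mk P m := fun ht => hseen ((hZ m).mpr ⟨hmmk, ht⟩)
      cases hf : TOE_GROUPS.find? (fun pair => pair.contains m) with
      | none =>
        dsimp only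
        have hmnontoe : m ∉ pvToeSet := pvFind_none_iff.mp hf
        have hmP : m ∉ P := by
          intro hc
          exact hntrig (by unfold pvTrig; rw [hf]; exact hc)
        have hmem : (m, [m]) ∈ build_marker_groups_alt mk := by
          rw [pvAlt_eq]
          exact (PySem.List.mem_sorted _ _ _ _).mpr (pvE_mem.mpr (Or.inr ⟨m, hmmk, hmnontoe, rfl⟩))
        rw [pvFilterHead (by simp [pvKey]) (pvAlt_eq mk ▸ pvSE_pairwise mk) hmem hmP hsmallE]
        congr 1
        apply ih (P ++ [m]) (PySem.Set.add Z m) hS'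
        intro x
        rw [pvContains_iff, PySem.Set.mem_add]
        constructor
        · rintro (hx | rfl)
          · have h1 := (hZ x).mp (pvContains_iff.mpr hx)
            exact ⟨h1.1, pvTrig_mono h1.2⟩
          · refine ⟨hmmk, ?_⟩
            unfold pvTrig
            rw [hf]
            simp
        · rintro ⟨hxmk, htr⟩
          by_cases hxm : x = m
          · exact Or.inr hxm
          · left
            rw [← pvContains_iff]
            apply (hZ x).mpr ⟨hxmk, ?_⟩
            unfold pvTrig at htr ⊢
            cases heq : TOE_GROUPS.find? (fun pair => pair.contains x) with
            | some pair =>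
              rw [heq] at htr
              simp only [Option.elim] at htr ⊢
              obtain ⟨y, hy1, hy2, hy3⟩ := htr
              rcases List.mem_append.mp hy3 with hyP | hyM
              · exact ⟨y, hy1, hy2, hyP⟩
              · exfalso
                have : y = m := by simpa using hyM
                subst this
                have : y ∈ pvToeSet := pvMem_toe_of_pair (List.mem_of_find?_eq_some heq) hy1
                exact hmnontoe this
            | none =>
              rw [heq] at htr
              simp only [Option.elim] at htr ⊢
              rcases List.mem_append.mp htr with hP | hM
              · exact hP
              · exact absurd (by simpa using hM) hxm
      | some pair =>
        dsimp only
        have hpmem : pair ∈ TOE_GROUPS := List.mem_of_find?_eq_some hf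
        have hmp : m ∈ pair := by
          have := List.find?_some hf
          simpa using this
        have hgne' : m ∈ pair.filter (fun x => mk.contains x) :=
          List.mem_filter.mpr ⟨hmp, by simpa using hmmk⟩
        have hgE : (pair.filter (fun x => mk.contains x)).isEmpty = false := by
          rcases h : pair.filter (fun x => mk.contains x) with _ | _
          · rw [h] at hgne'; cases hgne'
          · simp
        simp only [hgE, Bool.false_eq_true, reduceIte]
        have hgroupne : pvGroup mk pair ≠ [] := by
          unfold pvGroup
          intro hc
          rw [PySem.List.sorted_eq_nil_iff] at hc
          rw [hc] at hgne'
          cases hgne'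
        have hk := pvKey_entry (p := pair) hgroupne
        have hkeym : pvKey (pvEntryB mk pair) = m := by
          by_contra hne
          have hlt : pvKey (pvEntryB mk pair) < m :=
            lt_of_le_of_ne (hk.2.2 m hmp hmmk) hne
          have hkP : pvKey (pvEntryB mk pair) ∈ P := hsmallP _ hk.2.1 hlt
          exact hntrig (by unfold pvTrig; rw [hf]; exact ⟨_, hk.1, hk.2.1, hkP⟩)
        have hmP : m ∉ P := by
          intro hc
          exact hntrig (by unfold pvTrig; rw [hf]; exact ⟨m, hmp, hmmk, hc⟩)
        have hmem : pvEntryB mk pair ∈ build_marker_groups_alt mk := by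
          rw [pvAlt_eq]
          exact (PySem.List.mem_sorted _ _ _ _).mpr
            (pvE_mem.mpr (Or.inl ⟨pair, hpmem, hgroupne, rfl⟩))
        have hlen : (pvGroup mk pair).length ≤ 2 := by
          have h1 : (pvGroup mk pair).length = (pair.filter (fun x => mk.contains x)).length :=
            PySem.List.length_sorted _ _ _
          have h2 := List.length_filter_le (fun x => mk.contains x) pair
          have h3 : pair.length = 2 := by
            simp only [TOE_GROUPS, List.mem_cons] at hpmem
            rcases hpmem with rfl | h <;> simp_all
          omega
        have hentry : (pvLabelA (pvGroup mk pair), pvGroup mk pair) = pvEntryB mk pair := by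
          rw [pvLabelA_eq _ hlen, pvEntryB]
        rw [show PySem.List.sorted (pair.filter (fun x => mk.contains x)) (fun x => x) false
              = pvGroup mk pair from rfl]
        rw [hentry, pvFilterHead hkeym (pvAlt_eq mk ▸ pvSE_pairwise mk) hmem hmP hsmallE]
        congr 1
        apply ih (P ++ [m]) _ hS'
        intro x
        rw [show (pvGroup mk pair).foldl PySem.Set.add Z
              = (pvGroup mk pair).foldl PySem.Set.add Z from rfl]
        rw [pvFoldAdd]
        constructor
        · rintro (hxg | hx)
          · have hx2 := pvMem_group.mp hxg
            refine ⟨hx2.2, ?_⟩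
            unfold pvTrig
            rw [pvFind_of_mem hpmem hx2.1]
            exact ⟨m, hmp, hmmk, by simp⟩
          · have h1 := (hZ x).mp hx
            exact ⟨h1.1, pvTrig_mono h1.2⟩
        · rintro ⟨hxmk, htr⟩
          unfold pvTrig at htr
          cases heq : TOE_GROUPS.find? (fun pair => pair.contains x) with
          | some pair' =>
            rw [heq] at htr
            simp only [Option.elim] at htr
            obtain ⟨y, hy1, hy2, hy3⟩ := htr
            rcases List.mem_append.mp hy3 with hyP | hyM
            · right
              apply (hZ x).mpr ⟨hxmk, ?_⟩
              unfold pvTrig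
              rw [heq]
              exact ⟨y, hy1, hy2, hyP⟩
            · left
              have hym : y = m := by simpa using hyM
              subst hym
              have hpeq : pair' = pair :=
                pvPair_unique (List.mem_of_find?_eq_some heq) hpmem hy1 hmp
              subst hpeq
              have hxp : x ∈ pair' := by
                have := List.find?_some heq
                simpa using this
              exact pvMem_group.mpr ⟨hxp, hxmk⟩
          | none =>
            rw [heq] at htr
            simp only [Option.elim] at htr
            rcases List.mem_append.mp htr with hP | hM
            · right
              apply (hZ x).mpr ⟨hxmk, ?_⟩
              unfold pvTrig
              rw [heq]
              exact hP
            · exfalso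
              have : x = m := by simpa using hM
              subst this
              rw [heq] at hf
              cases hf

-- ===== VERDICT (by name: the statement is the Claim_ definition above) =====
theorem build_marker_groups_spec : Claim_equal_build_marker_groups := by
  intro mk _
  unfold Spec_build_marker_groups build_marker_groups
  rw [pvFoldEq mk _ _, pvMain mk _ [] PySem.Set.empty (by simp) (by intro x; simp [PySem.Set.contains, PySem.Set.empty, pvTrig_nil mk x])]
  simp
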